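-- pv_equiv track=rewrite | github.com/Lua78/AdventOfCode2023 | DayOne.py | santaFloor
-- ===== SOURCE A (Python) =====
-- def santaFloor(steps):
--     res = 0
--     for i in range(len(steps)):
--         if steps[i]=='(':
--             res += 1
--         elif steps[i] == ')':
--             res -=1
--         if res == -1:
--             return i+1
--     return res
-- ===== SOURCE B (Python) =====
-- def santaFloor(steps):
--     # Pass 1: build the prefix-sum table of floor values.
--     prefix = []
--     total = 0
--     for c in steps:
--         total += (c == '(') - (c == ')')
--         prefix.append(total)
--     # Pass 2: scan the table for the first time the basement (-1) is reached.
--     for i, v in enumerate(prefix):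
--         if v == -1:
--             return i + 1
--     return total
-- ===== Notes on version B (the rewrite author's own statement) =====
-- stated objective: alternative
-- what changed: Replaces A's fused single scan (running counter with early return inside the same loop) by two separate passes: first build the full prefix-sum table of floor values, then scan that table for the first -1, falling back to the final total.
import Mathlib
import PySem

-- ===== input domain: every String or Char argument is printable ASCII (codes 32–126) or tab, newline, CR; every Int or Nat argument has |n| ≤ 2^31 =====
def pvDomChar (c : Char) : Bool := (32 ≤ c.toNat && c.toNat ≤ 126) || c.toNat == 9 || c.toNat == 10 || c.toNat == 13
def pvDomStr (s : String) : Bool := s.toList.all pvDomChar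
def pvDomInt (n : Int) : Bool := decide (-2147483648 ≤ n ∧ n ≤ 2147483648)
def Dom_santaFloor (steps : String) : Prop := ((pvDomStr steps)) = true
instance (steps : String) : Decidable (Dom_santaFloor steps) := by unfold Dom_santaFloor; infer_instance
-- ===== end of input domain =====

-- B builds a prefix-sum table of floor values first and then scans it for the first -1,
-- instead of A's fused single scan; alternative decomposition, same O(n) cost.


-- ===== PORT A =====
-- A's loop: running counter `res`, early return i+1 the moment res hits -1.
def santaFloorGo (cs : List Char) (i : Nat) (res : Int) : Int :=
  match cs with
  | [] => res
  | c :: rest =>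
    let res' := if c = '(' then res + 1 else if c = ')' then res - 1 else res
    if res' = -1 then (i : Int) + 1 else santaFloorGo rest (i + 1) res'

def santaFloor (steps : String) : Int := santaFloorGo steps.toList 0 0

-- ===== PORT B =====
-- Pass 1 of Source B: build the prefix-sum table (each loop step appends the running total).
def altPrefix (cs : List Char) (total : Int) : List Int :=
  match cs with
  | [] => []
  | c :: rest =>
    let t := total + (if c = '(' then 1 else 0) - (if c = ')' then 1 else 0)
    t :: altPrefix rest t

def altTotal (cs : List Char) (total : Int) : Int :=
  match cs with
  | [] => total
  | c :: rest => altTotal rest (total + (if c = '(' then 1 else 0) - (if c = ')' then 1 else 0))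

-- Pass 2 of Source B: enumerate the table, return i+1 at the first -1.
def altScan (vs : List Int) (i : Nat) : Option Int :=
  match vs with
  | [] => none
  | v :: rest => if v = -1 then some ((i : Int) + 1) else altScan rest (i + 1)

def santaFloor_alt (steps : String) : Int :=
  match altScan (altPrefix steps.toList 0) 0 with
  | some r => r
  | none => altTotal steps.toList 0

-- ===== PRECONDITION & SPEC =====
def Spec_santaFloor (steps : String) (out : Int) : Prop := out = santaFloor_alt steps
instance (steps : String) (out : Int) : Decidable (Spec_santaFloor steps out) := by unfold Spec_santaFloor; infer_instance

-- ===== CLAIM (what is proved, stated in full; the proofs are below) =====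
def Claim_equal_santaFloor : Prop := ∀ (steps : String), Dom_santaFloor steps → Spec_santaFloor steps (santaFloor steps)

-- ===== LEMMAS AND PROOFS =====
theorem santaFloorGo_eq (cs : List Char) : ∀ (i : Nat) (res : Int),
    santaFloorGo cs i res =
      (match altScan (altPrefix cs res) i with
       | some r => r
       | none => altTotal cs res) := by
  induction cs with
  | nil => intro i res; simp [santaFloorGo, altPrefix, altScan, altTotal]
  | cons c rest ih =>
    intro i res
    simp only [santaFloorGo, altPrefix, altScan, altTotal]
    have hstep : (if c = '(' then res + 1 else if c = ')' then res - 1 else res)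
        = res + (if c = '(' then 1 else 0) - (if c = ')' then 1 else 0) := by
      by_cases h1 : c = '('
      · simp [h1]
      · by_cases h2 : c = ')' <;> simp [h1, h2]
    rw [hstep]
    by_cases h : res + (if c = '(' then 1 else 0) - (if c = ')' then 1 else 0) = -1
    · simp only [h, if_pos]
    · simp only [h, if_neg, ite_false]
      exact ih (i + 1) _

-- ===== VERDICT (by name: the statement is the Claim_ definition above) =====
theorem santaFloor_spec : Claim_equal_santaFloor := by
  intro steps _
  unfold Spec_santaFloor santaFloor santaFloor_alt
  exact santaFloorGo_eq steps.toList 0 0
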